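-- pv_equiv track=rewrite | github.com/fatma372/operations-on-NDB | NDB-final.py | PrefixAlgo
-- ===== SOURCE A (Python) =====
-- def PrefixAlgo(DB, length):
--     W = set()
--     for BitCount in range(1, length + 1):
--         possible_Prefixs = [format(i, '0' + str(BitCount) + 'b') for i in range(2**BitCount)]
--         for possible_Prefix in possible_Prefixs:
--             if not any(s.startswith(possible_Prefix) for s in DB):
--                 new_element = possible_Prefix + '*' * (length - len(possible_Prefix))
--                 flag = True
--                 for ele in W:
--                     tflag = False
--                     for p, v in zip(ele, new_element):
--                         if p != '*' and p != v:
--                             tflag = True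
--                     if not tflag:
--                         flag = False
--                 if flag:
--                     W.add(new_element)
--     return W
-- ===== SOURCE B (Python) =====
-- def PrefixAlgo(DB, length):
--     # Trie-style level search: expand only prefixes that still match some DB
--     # string; a dead branch is emitted immediately, padded with '*'.
--     prefs = set()
--     for s in DB:
--         for k in range(1, length + 1):
--             prefs.add(s[:k])
--     out = set()
--     level = ['0', '1']
--     for depth in range(1, length + 1):
--         nxt = []
--         for q in level:
--             if q in prefs:
--                 nxt.append(q + '0')
--                 nxt.append(q + '1')
--             else:
--                 out.add(q + '*' * (length - depth))
--         level = nxt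
--     return out
-- ===== Notes on version B (the rewrite author's own statement) =====
-- stated objective: alternative
-- what changed: A enumerates all 2^BitCount binary candidate prefixes per bit count and keeps a quadratic minimality scan over the result set W; B precomputes the set of DB prefixes once and expands only still-matching prefixes level by level (a trie-style frontier search), emitting each dead branch immediately, so the exhaustive candidate enumeration and the W scan disappear.
import Mathlib
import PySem

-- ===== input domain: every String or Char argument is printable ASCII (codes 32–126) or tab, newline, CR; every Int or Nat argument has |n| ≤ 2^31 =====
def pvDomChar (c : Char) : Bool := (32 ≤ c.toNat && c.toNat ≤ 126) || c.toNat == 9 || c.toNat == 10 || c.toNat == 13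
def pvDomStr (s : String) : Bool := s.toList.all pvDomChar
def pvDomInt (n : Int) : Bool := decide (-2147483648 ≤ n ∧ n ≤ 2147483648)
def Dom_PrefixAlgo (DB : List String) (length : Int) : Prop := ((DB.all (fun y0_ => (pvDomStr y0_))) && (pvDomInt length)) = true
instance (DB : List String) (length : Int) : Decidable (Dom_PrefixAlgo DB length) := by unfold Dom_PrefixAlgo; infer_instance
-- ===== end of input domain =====

-- B replaces A's scan of all 2^BitCount candidate prefixes per bit count (with an inner
-- minimality scan over the result set W) by a trie-style level expansion of only the
-- prefixes still matching some DB string, over a precomputed set of DB prefixes.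

-- ===== PORT A =====
-- format(i, '0' + str(d) + 'b'): binary digits of i, zero-padded to width d (exact for i < 2^d,
-- which is the only way A calls it)
def pvBin : Nat → Nat → List Char
  | 0, _ => []
  | d+1, i => pvBin d (i / 2) ++ [if i % 2 == 1 then '1' else '0']

def PrefixAlgo (DB : List String) (length : Int) : List String :=
  let W : PySem.Set (List Char) :=
    (PySem.List.pyRange 1 (length + 1) 1).foldl (fun W bitCount =>
      let possiblePrefixs := (PySem.List.pyRange 0 ((2:Int) ^ bitCount.toNat) 1).map
          (fun i => pvBin bitCount.toNat i.toNat)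
      possiblePrefixs.foldl (fun W p =>
        if !(DB.any (fun s => PySem.Chars.startswith s.toList p)) then
          let newElement := p ++ List.replicate (length - (p.length : Int)).toNat '*'
          let flag := W.foldl (fun flag ele =>
            let tflag := (ele.zip newElement).foldl
                (fun t pv => if pv.1 ≠ '*' ∧ pv.1 ≠ pv.2 then true else t) false
            if !tflag then false else flag) true
          if flag then PySem.Set.add W newElement else W
        else W) W) PySem.Set.empty
  W.map String.ofList

-- ===== PORT B =====
def PrefixAlgo_alt (DB : List String) (length : Int) : List String :=
  let prefs : PySem.Set (List Char) :=
    DB.foldl (fun pr s =>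
      (PySem.List.pyRange 1 (length + 1) 1).foldl (fun pr k =>
        PySem.Set.add pr (PySem.List.slice s.toList none (some k))) pr) PySem.Set.empty
  let final := (PySem.List.pyRange 1 (length + 1) 1).foldl
    (fun (st : PySem.Set (List Char) × List (List Char)) depth =>
      st.2.foldl (fun st2 q =>
        if PySem.Set.contains prefs q then
          (st2.1, st2.2 ++ [q ++ ['0']] ++ [q ++ ['1']])
        else
          (PySem.Set.add st2.1 (q ++ List.replicate (length - depth).toNat '*'), st2.2))
        (st.1, []))
    (PySem.Set.empty, [['0'], ['1']])
  final.1.map String.ofList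

-- ===== PRECONDITION & SPEC =====
def Spec_PrefixAlgo (DB : List String) (length : Int) (out : List String) : Prop := out = PrefixAlgo_alt DB length
instance (DB : List String) (length : Int) (out : List String) : Decidable (Spec_PrefixAlgo DB length out) := by unfold Spec_PrefixAlgo; infer_instance

-- ===== CLAIM (what is proved, stated in full; the proofs are below) =====
def Claim_equal_PrefixAlgo : Prop := ∀ (DB : List String) (length : Int), Dom_PrefixAlgo DB length → Spec_PrefixAlgo DB length (PrefixAlgo DB length)

-- ===== LEMMAS AND PROOFS =====

-- proof-side vocabulary
def pvIsBin (q : List Char) : Bool := q.all (fun c => c == '0' || c == '1')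
def pvAlive (DB : List String) (q : List Char) : Bool := DB.any (fun s => PySem.Chars.startswith s.toList q)
def pvGood (DB : List String) (q : List Char) : Bool := q.length == 1 || pvAlive DB q.dropLast
def pvMinDead (DB : List String) (q : List Char) : Bool := !pvAlive DB q && pvGood DB q
def pvPad (N : Nat) (q : List Char) : List Char := q ++ List.replicate (N - q.length) '*'
def pvChilds (q : List Char) : List (List Char) := [q ++ ['0']] ++ [q ++ ['1']]
def pvBinL : Nat → List (List Char)
  | 0 => [[]]
  | d+1 => (pvBinL d).flatMap pvChilds
def pvWspec (DB : List String) (N : Nat) (k : Nat) : List (List Char) :=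
  (List.range k).flatMap (fun j => ((pvBinL (j+1)).filter (pvMinDead DB)).map (pvPad N))
def pvLvl (DB : List String) (d : Nat) : List (List Char) := (pvBinL d).filter (pvGood DB)
def pvVal (q : List Char) : Nat := q.foldl (fun n c => 2 * n + (if c = '1' then 1 else 0)) 0

-- the port loop bodies, named so the lemmas can talk about them (definitionally the port lambdas)
def pvStepA (DB : List String) (length : Int) (W : PySem.Set (List Char)) (p : List Char) : PySem.Set (List Char) :=
  if !(DB.any (fun s => PySem.Chars.startswith s.toList p)) then
    let newElement := p ++ List.replicate (length - (p.length : Int)).toNat '*'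
    let flag := W.foldl (fun flag ele =>
      let tflag := (ele.zip newElement).foldl
          (fun t pv => if pv.1 ≠ '*' ∧ pv.1 ≠ pv.2 then true else t) false
      if !tflag then false else flag) true
    if flag then PySem.Set.add W newElement else W
  else W

def pvBodyA (DB : List String) (length : Int) (W : PySem.Set (List Char)) (bitCount : Int) : PySem.Set (List Char) :=
  ((PySem.List.pyRange 0 ((2:Int) ^ bitCount.toNat) 1).map (fun i => pvBin bitCount.toNat i.toNat)).foldl
    (fun W p => pvStepA DB length W p) W

def pvPrefs (DB : List String) (length : Int) : PySem.Set (List Char) :=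
  DB.foldl (fun pr s =>
    (PySem.List.pyRange 1 (length + 1) 1).foldl (fun pr k =>
      PySem.Set.add pr (PySem.List.slice s.toList none (some k))) pr) PySem.Set.empty

def pvStepB (prefs : PySem.Set (List Char)) (length : Int) (depth : Int)
    (st2 : PySem.Set (List Char) × List (List Char)) (q : List Char) :
    PySem.Set (List Char) × List (List Char) :=
  if PySem.Set.contains prefs q then
    (st2.1, st2.2 ++ [q ++ ['0']] ++ [q ++ ['1']])
  else
    (PySem.Set.add st2.1 (q ++ List.replicate (length - depth).toNat '*'), st2.2)

def pvBodyB (prefs : PySem.Set (List Char)) (length : Int)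
    (st : PySem.Set (List Char) × List (List Char)) (depth : Int) :
    PySem.Set (List Char) × List (List Char) :=
  st.2.foldl (fun st2 q => pvStepB prefs length depth st2 q) (st.1, [])

lemma portA_eq (DB : List String) (length : Int) :
    PrefixAlgo DB length =
      ((PySem.List.pyRange 1 (length + 1) 1).foldl (pvBodyA DB length) PySem.Set.empty).map String.ofList := rfl

lemma portB_eq (DB : List String) (length : Int) :
    PrefixAlgo_alt DB length =
      (((PySem.List.pyRange 1 (length + 1) 1).foldl (pvBodyB (pvPrefs DB length) length)
        (PySem.Set.empty, [['0'], ['1']])).1).map String.ofList := rfl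

-- boolean fold shapes
lemma pvFoldOr {α : Type} (l : List α) (p : α → Prop) [DecidablePred p] (b : Bool) :
    l.foldl (fun t x => if p x then true else t) b = (b || l.any (fun x => decide (p x))) := by
  induction l generalizing b with
  | nil => simp
  | cons x t ih =>
    rw [List.foldl_cons]
    by_cases h : p x
    · rw [if_pos h, ih]; simp [h]
    · rw [if_neg h, ih]; simp [h]

lemma pvFoldAnd {α : Type} (l : List α) (c : α → Bool) (b : Bool) :
    l.foldl (fun t x => if c x then false else t) b = (b && l.all (fun x => !c x)) := by
  induction l generalizing b with
  | nil => simp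
  | cons x t ih =>
    rw [List.foldl_cons]
    cases h : c x
    · rw [if_neg (by simp [h]), ih]; simp [h]
    · rw [if_pos (by simp [h]), ih]; simp [h]

-- binary strings
lemma pvAlive_mono (DB : List String) {u v : List Char} (h : u <+: v) (hv : pvAlive DB v = true) :
    pvAlive DB u = true := by
  simp only [pvAlive, List.any_eq_true, PySem.Chars.startswith_iff] at *
  obtain ⟨s, hs, hp⟩ := hv
  exact ⟨s, hs, h.trans hp⟩

lemma pvIsBin_of_prefix {u v : List Char} (h : u <+: v) (hv : pvIsBin v = true) : pvIsBin u = true := by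
  simp only [pvIsBin, List.all_eq_true] at *
  exact fun c hc => hv c (h.subset hc)

lemma mem_pvBinL {q : List Char} {d : Nat} : q ∈ pvBinL d ↔ q.length = d ∧ pvIsBin q = true := by
  induction d generalizing q with
  | zero =>
    simp only [pvBinL, List.mem_singleton]
    constructor
    · rintro rfl; simp [pvIsBin]
    · rintro ⟨h, _⟩; exact List.length_eq_zero_iff.mp h
  | succ d ih =>
    simp only [pvBinL, List.mem_flatMap]
    constructor
    · rintro ⟨q0, hq0, hq⟩
      rcases ih.mp hq0 with ⟨hlen, hbin⟩
      simp only [pvChilds, List.cons_append, List.nil_append, List.mem_cons,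
        List.not_mem_nil, or_false] at hq
      have hb : ∀ c, c = '0' ∨ c = '1' → pvIsBin (q0 ++ [c]) = true := by
        intro c hc
        simp only [pvIsBin, List.all_append, List.all_cons, List.all_nil, Bool.and_eq_true]
        refine ⟨hbin, ?_, trivial⟩
        rcases hc with rfl | rfl <;> decide
      rcases hq with rfl | rfl
      · exact ⟨by simp [hlen], hb '0' (Or.inl rfl)⟩
      · exact ⟨by simp [hlen], hb '1' (Or.inr rfl)⟩
    · rintro ⟨hlen, hbin⟩
      have hne : q ≠ [] := by intro e; subst e; simp at hlen
      obtain ⟨q0, c, rfl⟩ : ∃ q0 c, q = q0 ++ [c] :=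
        ⟨q.dropLast, q.getLast hne, (List.dropLast_append_getLast hne).symm⟩
      have hlen0 : q0.length = d := by simp at hlen; omega
      have hbin0 : pvIsBin q0 = true := pvIsBin_of_prefix ⟨[c], rfl⟩ hbin
      have hc : c = '0' ∨ c = '1' := by
        simp only [pvIsBin, List.all_eq_true] at hbin
        have := hbin c (by simp)
        rcases Bool.or_eq_true_iff.mp this with h1 | h1
        · exact Or.inl (by simpa using h1)
        · exact Or.inr (by simpa using h1)
      refine ⟨q0, ih.mpr ⟨hlen0, hbin0⟩, ?_⟩
      simp only [pvChilds, List.cons_append, List.nil_append, List.mem_cons,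
        List.not_mem_nil, or_false]
      rcases hc with rfl | rfl
      · exact Or.inl rfl
      · exact Or.inr rfl

lemma pvFlatMap_congr {α β : Type} (l : List α) (f g : α → List β)
    (h : ∀ x ∈ l, f x = g x) : l.flatMap f = l.flatMap g := by
  induction l with
  | nil => rfl
  | cons x t ih =>
    simp only [List.flatMap_cons, h x (by simp), ih (fun y hy => h y (by simp [hy]))]

lemma pvFlatMap_ite {α β : Type} (l : List α) (p : α → Bool) (g : α → List β) :
    l.flatMap (fun q => if p q then g q else []) = (l.filter p).flatMap g := by
  induction l with
  | nil => rfl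
  | cons x t ih =>
    cases h : p x <;> simp [List.filter_cons, h, ih]

lemma pvRange_two_mul {α : Type} (n : Nat) (f : Nat → α) :
    (List.range (2 * n)).map f = (List.range n).flatMap (fun j => [f (2 * j), f (2 * j + 1)]) := by
  induction n with
  | zero => simp
  | succ n ih =>
    have h2 : 2 * (n + 1) = (2 * n) + 1 + 1 := by ring
    rw [h2, List.range_succ, List.range_succ, List.range_succ, List.map_append, List.map_append,
      ih, List.flatMap_append]
    simp

lemma pvBinL_enum (d : Nat) : (List.range (2 ^ d)).map (pvBin d) = pvBinL d := by
  induction d with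
  | zero => rfl
  | succ d ih =>
    have h : (2:Nat) ^ (d + 1) = 2 * 2 ^ d := by ring
    rw [h, pvRange_two_mul]
    have hstep : ∀ j ∈ List.range (2 ^ d),
        [pvBin (d+1) (2 * j), pvBin (d+1) (2 * j + 1)] = pvChilds (pvBin d j) := by
      intro j _
      have e1 : 2 * j / 2 = j := by omega
      have e2 : (2 * j + 1) / 2 = j := by omega
      have e3 : 2 * j % 2 = 0 := by omega
      have e4 : (2 * j + 1) % 2 = 1 := by omega
      simp [pvBin, pvChilds, e1, e2, e3, e4]
    rw [pvFlatMap_congr _ _ _ hstep, ← List.flatMap_map (pvBin d) pvChilds, ih]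
    rfl

lemma pvVal_pvBin : ∀ (d i : Nat), i < 2 ^ d → pvVal (pvBin d i) = i := by
  intro d
  induction d with
  | zero => intro i hi; interval_cases i; rfl
  | succ d ih =>
    intro i hi
    have h2 : (2:Nat) ^ (d+1) = 2 * 2 ^ d := by ring
    have hi2 : i / 2 < 2 ^ d := by omega
    have hfold : pvVal (pvBin (d+1) i)
        = 2 * pvVal (pvBin d (i / 2)) + (if (if i % 2 == 1 then '1' else '0') = '1' then 1 else 0) := by
      simp [pvBin, pvVal, List.foldl_append]
    rw [hfold, ih _ hi2]
    have hm : i % 2 = 0 ∨ i % 2 = 1 := by omega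
    rcases hm with hm | hm <;> simp [hm] <;> omega

lemma nodup_pvBinL (d : Nat) : (pvBinL d).Nodup := by
  rw [← pvBinL_enum]
  refine List.Nodup.map_on ?_ (List.nodup_range)
  intro i hi j hj hij
  rw [List.mem_range] at hi hj
  have := congrArg pvVal hij
  rwa [pvVal_pvBin d i hi, pvVal_pvBin d j hj] at this

lemma pvTakeWhile_pad (q : List Char) (m : Nat) (h : pvIsBin q = true) :
    (q ++ List.replicate m '*').takeWhile (fun c => !(c == '*')) = q := by
  induction q with
  | nil =>
    cases m with
    | zero => rfl
    | succ m => simp [List.replicate_succ]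
  | cons c q' ih =>
    simp only [pvIsBin, List.all_cons, Bool.and_eq_true] at h
    have hc : ¬ (c == '*') = true := by
      rcases Bool.or_eq_true_iff.mp h.1 with h1 | h1 <;>
        · simp only [beq_iff_eq] at h1 ⊢; subst h1; decide
    simp only [List.cons_append, List.takeWhile_cons]
    rw [if_pos (by simp_all)]
    exact congrArg (c :: ·) (ih (by simpa [pvIsBin] using h.2))

lemma pvPad_inj {N : Nat} {q q' : List Char} (hq : pvIsBin q = true) (hq' : pvIsBin q' = true)
    (h : pvPad N q = pvPad N q') : q = q' := by
  have := congrArg (List.takeWhile (fun c => !(c == '*'))) h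
  rwa [pvPad, pvPad, pvTakeWhile_pad q _ hq, pvTakeWhile_pad q' _ hq'] at this

lemma pvZipAny (q' q : List Char) (a b : Nat) (h' : pvIsBin q' = true) (h : pvIsBin q = true)
    (hl : q'.length + a = q.length + b) :
    ((q' ++ List.replicate a '*').zip (q ++ List.replicate b '*')).any
      (fun pv => decide (pv.1 ≠ '*' ∧ pv.1 ≠ pv.2)) = !decide (q' <+: q) := by
  induction q' generalizing q a b with
  | nil =>
    have hpre : ([] : List Char) <+: q := List.nil_prefix
    simp only [List.nil_append, hpre, decide_true, Bool.not_true]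
    rw [List.any_eq_false]
    rintro ⟨x, y⟩ hmem
    have hx : x ∈ List.replicate a '*' := (List.of_mem_zip hmem).1
    have : x = '*' := List.eq_of_mem_replicate hx
    subst this; simp
  | cons c q'' ih =>
    have hcne : c ≠ '*' := by
      simp only [pvIsBin, List.all_cons, Bool.and_eq_true] at h'
      rcases Bool.or_eq_true_iff.mp h'.1 with h1 | h1 <;>
        · simp only [beq_iff_eq] at h1; subst h1; decide
    cases q with
    | nil =>
      have hb : ∃ b', b = b' + 1 := by
        refine ⟨b - 1, ?_⟩
        simp only [List.length_cons, List.length_nil] at hl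
        omega
      obtain ⟨b', rfl⟩ := hb
      simp only [List.nil_append, List.replicate_succ, List.cons_append, List.zip_cons_cons,
        List.any_cons]
      have hnp : ¬ ((c :: q'') <+: ([] : List Char)) := by
        intro hp; exact absurd (List.IsPrefix.length_le hp) (by simp)
      simp [hcne, hnp]
    | cons e qq =>
      simp only [List.cons_append, List.zip_cons_cons, List.any_cons]
      by_cases hce : c = e
      · subst hce
        have hl' : q''.length + a = qq.length + b := by
          simp only [List.length_cons] at hl; omega
        have hq'' : pvIsBin q'' = true := by
          simp only [pvIsBin, List.all_cons, Bool.and_eq_true] at h'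
          exact h'.2
        have hqq : pvIsBin qq = true := by
          simp only [pvIsBin, List.all_cons, Bool.and_eq_true] at h
          exact h.2
        rw [ih qq a b hq'' hqq hl']
        simp [List.cons_prefix_cons]
      · have hnp : ¬ ((c :: q'') <+: (e :: qq)) := by
          rw [List.cons_prefix_cons]; rintro ⟨rfl, -⟩; exact hce rfl
        simp [hcne, hce, hnp]

lemma pvExists_minDead_prefix (DB : List String) :
    ∀ q : List Char, pvAlive DB q = false → q ≠ [] →
      ∃ u, u <+: q ∧ u ≠ [] ∧ pvMinDead DB u = true := by
  intro q
  induction q using List.reverseRecOn with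
  | nil => intro _ hne; exact absurd rfl hne
  | append_singleton l a ih =>
    intro hdead _
    by_cases hm : pvMinDead DB (l ++ [a]) = true
    · exact ⟨l ++ [a], List.prefix_refl _, by simp, hm⟩
    · have hgood : pvGood DB (l ++ [a]) = false := by
        unfold pvMinDead at hm
        rw [hdead] at hm
        simpa using hm
      unfold pvGood at hgood
      rw [Bool.or_eq_false_iff] at hgood
      have hl : l ≠ [] := by
        intro e; subst e
        simp at hgood
      have hdl : (l ++ [a]).dropLast = l := List.dropLast_concat
      have haliveL : pvAlive DB l = false := by rw [← hdl]; exact hgood.2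
      obtain ⟨u, hu, hne, hmin⟩ := ih haliveL hl
      exact ⟨u, hu.trans ⟨[a], rfl⟩, hne, hmin⟩

lemma mem_pvWspec {DB : List String} {N k : Nat} {y : List Char} :
    y ∈ pvWspec DB N k ↔ ∃ q, pvMinDead DB q = true ∧ pvIsBin q = true ∧ 1 ≤ q.length ∧
      q.length ≤ k ∧ y = pvPad N q := by
  unfold pvWspec
  simp only [List.mem_flatMap, List.mem_range, List.mem_map, List.mem_filter]
  constructor
  · rintro ⟨j, hj, q, ⟨hqmem, hmd⟩, rfl⟩
    rcases mem_pvBinL.mp hqmem with ⟨hlen, hbin⟩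
    exact ⟨q, hmd, hbin, by omega, by omega, rfl⟩
  · rintro ⟨q, hmd, hbin, h1, hk, rfl⟩
    refine ⟨q.length - 1, by omega, q, ⟨?_, hmd⟩, rfl⟩
    have he : q.length - 1 + 1 = q.length := by omega
    rw [he]
    exact mem_pvBinL.mpr ⟨rfl, hbin⟩

lemma pvWspec_succ (DB : List String) (N k : Nat) :
    pvWspec DB N (k+1) = pvWspec DB N k ++ ((pvBinL (k+1)).filter (pvMinDead DB)).map (pvPad N) := by
  simp [pvWspec, List.range_succ]

lemma pvSet_add_of_not_mem {x : List Char} {s : PySem.Set (List Char)} (h : x ∉ s) :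
    PySem.Set.add s x = s ++ [x] := by
  simp [PySem.Set.add, PySem.Set.contains, h]

-- A-side inner step
lemma pvStepA_eq (DB : List String) (N k : Nat) (hkN : k + 1 ≤ N) (l₁ l₂ : List (List Char))
    (p : List Char) (hsplit : pvBinL (k+1) = l₁ ++ p :: l₂) :
    pvStepA DB (N : Int) (pvWspec DB N k ++ (l₁.filter (pvMinDead DB)).map (pvPad N)) p
      = pvWspec DB N k ++ ((l₁ ++ [p]).filter (pvMinDead DB)).map (pvPad N) := by
  have hpmem : p ∈ pvBinL (k+1) := by rw [hsplit]; simp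
  rcases mem_pvBinL.mp hpmem with ⟨hplen, hpbin⟩
  have hnd := nodup_pvBinL (k+1)
  rw [hsplit, List.nodup_append] at hnd
  have hpnotl₁ : p ∉ l₁ := fun hmem => hnd.2.2 p hmem p (by simp) rfl
  set W := pvWspec DB N k ++ (l₁.filter (pvMinDead DB)).map (pvPad N) with hW
  have hWmem : ∀ ele ∈ W, ∃ q', pvMinDead DB q' = true ∧ pvIsBin q' = true ∧ 1 ≤ q'.length ∧
      q'.length ≤ k + 1 ∧ (q'.length = k + 1 → q' ∈ l₁) ∧ ele = pvPad N q' := by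
    intro ele he
    rcases List.mem_append.mp he with h1 | h1
    · rcases mem_pvWspec.mp h1 with ⟨q', ha, hb, hc, hd, heq⟩
      exact ⟨q', ha, hb, hc, by omega, fun hh => absurd hh (by omega), heq⟩
    · rcases List.mem_map.mp h1 with ⟨q', hq'f, rfl⟩
      rcases List.mem_filter.mp hq'f with ⟨hq'l₁, hmd⟩
      have hq'b : q' ∈ pvBinL (k+1) := by rw [hsplit]; exact List.mem_append_left _ hq'l₁
      rcases mem_pvBinL.mp hq'b with ⟨hlen', hbin'⟩
      exact ⟨q', hmd, hbin', by omega, by omega, fun _ => hq'l₁, rfl⟩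
  simp only [pvStepA]
  have hAL : (DB.any fun s => PySem.Chars.startswith s.toList p) = pvAlive DB p := rfl
  rw [hAL]
  have htoNat : ((N:Int) - (p.length : Int)).toNat = N - p.length := by omega
  rw [htoNat]
  rw [pvFoldAnd W (fun ele => !((ele.zip (p ++ List.replicate (N - p.length) '*')).foldl
      (fun t pv => if pv.1 ≠ '*' ∧ pv.1 ≠ pv.2 then true else t) false)) true]
  simp only [Bool.true_and, Bool.not_not]
  have hT : ∀ q', pvIsBin q' = true → q'.length ≤ N →
      ((pvPad N q').zip (p ++ List.replicate (N - p.length) '*')).foldl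
        (fun t pv => if pv.1 ≠ '*' ∧ pv.1 ≠ pv.2 then true else t) false
        = !decide (q' <+: p) := by
    intro q' hb hlenq'
    rw [pvFoldOr _ _ false, Bool.false_or]
    show ((q' ++ List.replicate (N - q'.length) '*').zip
        (p ++ List.replicate (N - p.length) '*')).any _ = _
    exact pvZipAny q' p _ _ hb hpbin (by omega)
  by_cases hA : pvAlive DB p = true
  · rw [hA]
    have hmdp : pvMinDead DB p = false := by unfold pvMinDead; rw [hA]; rfl
    rw [hW, List.filter_append]
    simp [hmdp]
  · have hA' : pvAlive DB p = false := by simpa using hA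
    rw [hA']
    have hcond : (!(false:Bool)) = true := rfl
    rw [if_pos hcond]
    by_cases hMD : pvMinDead DB p = true
    · have hflag : (W.all fun ele => (ele.zip (p ++ List.replicate (N - p.length) '*')).foldl
          (fun t pv => if pv.1 ≠ '*' ∧ pv.1 ≠ pv.2 then true else t) false) = true := by
        rw [List.all_eq_true]
        intro ele he
        obtain ⟨q', hmd', hbin', h1', hk', hl₁', rfl⟩ := hWmem ele he
        rw [hT q' hbin' (by omega)]
        simp only [Bool.not_eq_eq_eq_not, Bool.not_true, decide_eq_false_iff_not]
        intro hpre
        by_cases hq'l : q'.length = k + 1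
        · have heqp : q' = p := hpre.eq_of_length (by omega)
          exact hpnotl₁ (heqp ▸ hl₁' hq'l)
        · have hdp : q' <+: p.dropLast :=
            List.prefix_of_prefix_length_le hpre (List.dropLast_prefix p)
              (by rw [List.length_dropLast]; omega)
          have hgood : pvGood DB p = true := by
            unfold pvMinDead at hMD
            rw [Bool.and_eq_true] at hMD
            exact hMD.2
          unfold pvGood at hgood
          rcases Bool.or_eq_true_iff.mp hgood with hg | hg
          · have hp1 : p.length = 1 := by simpa using hg
            omega
          · have halq' : pvAlive DB q' = true := pvAlive_mono DB hdp hg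
            unfold pvMinDead at hmd'
            rw [Bool.and_eq_true] at hmd'
            have := hmd'.1
            rw [halq'] at this
            simp at this
      rw [hflag, if_pos rfl]
      have hnm : p ++ List.replicate (N - p.length) '*' ∉ W := by
        intro hmem
        obtain ⟨q', hmd', hbin', h1', hk', hl₁', heq⟩ := hWmem _ hmem
        have heqp : q' = p := pvPad_inj hbin' hpbin heq.symm
        subst heqp
        exact hpnotl₁ (hl₁' (by omega))
      rw [pvSet_add_of_not_mem hnm, hW, List.filter_append]
      simp [hMD, pvPad]
    · have hmdp : pvMinDead DB p = false := by simpa using hMD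
      have hgoodf : pvGood DB p = false := by
        unfold pvMinDead at hmdp
        rw [hA'] at hmdp
        simpa using hmdp
      unfold pvGood at hgoodf
      rw [Bool.or_eq_false_iff] at hgoodf
      have hlen1 : p.length ≠ 1 := by simpa using hgoodf.1
      have hdldead : pvAlive DB p.dropLast = false := hgoodf.2
      have hdlne : p.dropLast ≠ [] := by
        intro e
        have := congrArg List.length e
        rw [List.length_dropLast] at this
        simp at this
        omega
      obtain ⟨u, hu, hune, humd⟩ := pvExists_minDead_prefix DB p.dropLast hdldead hdlne
      have hup : u <+: p := hu.trans (List.dropLast_prefix p)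
      have hubin : pvIsBin u = true := pvIsBin_of_prefix hup hpbin
      have hulen : u.length ≤ k := by
        have := hu.length_le
        rw [List.length_dropLast] at this
        omega
      have hu1 : 1 ≤ u.length := by
        cases u with
        | nil => exact absurd rfl hune
        | cons _ _ => simp
      have hmemW : pvPad N u ∈ W := by
        rw [hW]
        exact List.mem_append_left _ (mem_pvWspec.mpr ⟨u, humd, hubin, hu1, hulen, rfl⟩)
      have hflag : (W.all fun ele => (ele.zip (p ++ List.replicate (N - p.length) '*')).foldl
          (fun t pv => if pv.1 ≠ '*' ∧ pv.1 ≠ pv.2 then true else t) false) = false := by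
        rw [List.all_eq_false]
        refine ⟨pvPad N u, hmemW, ?_⟩
        rw [hT u hubin (by omega)]
        simp [hup]
      rw [hflag, if_neg (by simp), hW, List.filter_append]
      simp [hmdp]

lemma pvInnerA (DB : List String) (N k : Nat) (hkN : k + 1 ≤ N) :
    ∀ l₂ l₁ : List (List Char), pvBinL (k+1) = l₁ ++ l₂ →
      l₂.foldl (fun W p => pvStepA DB (N : Int) W p)
          (pvWspec DB N k ++ (l₁.filter (pvMinDead DB)).map (pvPad N))
        = pvWspec DB N k ++ ((l₁ ++ l₂).filter (pvMinDead DB)).map (pvPad N) := by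
  intro l₂
  induction l₂ with
  | nil => intro l₁ h; simp
  | cons p l₂' ih =>
    intro l₁ h
    rw [List.foldl_cons, pvStepA_eq DB N k hkN l₁ l₂' p h,
        ih (l₁ ++ [p]) (by rw [h]; simp)]
    simp

lemma pvOuterA (DB : List String) (N : Nat) :
    ∀ k : Nat, k ≤ N →
      (PySem.List.pyRange 1 ((k : Int) + 1) 1).foldl (pvBodyA DB (N : Int)) PySem.Set.empty
        = pvWspec DB N k := by
  intro k
  induction k with
  | zero =>
    intro _
    rw [show ((0:Nat):Int) + 1 = 1 by norm_num, PySem.List.pyRange_one_eq_nil (by omega)]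
    rfl
  | succ k ih =>
    intro hk
    rw [show (((k+1:Nat)):Int) + 1 = ((k:Int) + 1) + 1 by push_cast; ring,
      PySem.List.pyRange_one_succ_right (by omega), List.foldl_append, ih (by omega)]
    simp only [List.foldl_cons, List.foldl_nil]
    unfold pvBodyA
    rw [show ((k:Int) + 1).toNat = k + 1 by omega]
    have henum : (PySem.List.pyRange 0 ((2:Int) ^ (k+1)) 1).map (fun i => pvBin (k+1) i.toNat)
        = pvBinL (k+1) := by
      rw [PySem.List.pyRange_one, sub_zero,
        show ((2:Int) ^ (k+1)) = ((2 ^ (k+1) : Nat) : Int) by push_cast; ring,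
        Int.toNat_natCast, List.map_map]
      rw [show ((fun i => pvBin (k+1) i.toNat) ∘ (fun j : Nat => (0:Int) + (j:Int)))
          = fun j : Nat => pvBin (k+1) j from by funext j; simp]
      exact pvBinL_enum (k+1)
    rw [henum]
    have h := pvInnerA DB N k (by omega) (pvBinL (k+1)) [] (by simp)
    simp only [List.filter_nil, List.map_nil, List.append_nil, List.nil_append] at h
    rw [h, ← pvWspec_succ]

-- B-side
lemma mem_pvPrefs {DB : List String} {length : Int} {q : List Char} :
    q ∈ pvPrefs DB length ↔ ∃ s ∈ DB, ∃ k : Int, 1 ≤ k ∧ k < length + 1 ∧ q = s.toList.take k.toNat := by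
  have hgen : ∀ (DBl : List String) (pr : PySem.Set (List Char)),
      q ∈ DBl.foldl (fun pr s => (PySem.List.pyRange 1 (length+1) 1).foldl
          (fun pr k => PySem.Set.add pr (PySem.List.slice s.toList none (some k))) pr) pr
        ↔ q ∈ pr ∨ ∃ s ∈ DBl, ∃ k : Int, 1 ≤ k ∧ k < length + 1 ∧ q = s.toList.take k.toNat := by
    intro DBl
    induction DBl with
    | nil => intro pr; simp
    | cons s t ih =>
      intro pr
      rw [List.foldl_cons, ih]
      have hin : q ∈ (PySem.List.pyRange 1 (length+1) 1).foldl
          (fun pr k => PySem.Set.add pr (PySem.List.slice s.toList none (some k))) pr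
          ↔ q ∈ pr ∨ ∃ kk : Int, 1 ≤ kk ∧ kk < length + 1 ∧ q = s.toList.take kk.toNat := by
        rw [PySem.Set.mem_foldl_add]
        constructor
        · rintro (h | ⟨b, hb, rfl⟩)
          · exact Or.inl h
          · rcases PySem.List.mem_pyRange_one.mp hb with ⟨h1, h2⟩
            exact Or.inr ⟨b, h1, h2, by rw [PySem.List.slice_to _ (by omega)]⟩
        · rintro (h | ⟨kk, h1, h2, rfl⟩)
          · exact Or.inl h
          · exact Or.inr ⟨kk, PySem.List.mem_pyRange_one.mpr ⟨h1, h2⟩,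
              by rw [PySem.List.slice_to _ (by omega)]⟩
      rw [hin]
      constructor
      · rintro ((h | ⟨kk, h1, h2, rfl⟩) | ⟨s', hs', hrest⟩)
        · exact Or.inl h
        · exact Or.inr ⟨s, by simp, kk, h1, h2, rfl⟩
        · exact Or.inr ⟨s', by simp [hs'], hrest⟩
      · rintro (h | ⟨s', hs', hrest⟩)
        · exact Or.inl (Or.inl h)
        · rcases List.mem_cons.mp hs' with rfl | hs''
          · exact Or.inl (Or.inr hrest)
          · exact Or.inr ⟨s', hs'', hrest⟩
  have h := hgen DB PySem.Set.empty
  simpa [pvPrefs, PySem.Set.empty] using h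

lemma pvContains_prefs (DB : List String) (length : Int) (q : List Char)
    (h1 : 1 ≤ q.length) (h2 : (q.length : Int) ≤ length) :
    PySem.Set.contains (pvPrefs DB length) q = pvAlive DB q := by
  have hcm : PySem.Set.contains (pvPrefs DB length) q = true ↔ q ∈ pvPrefs DB length := by
    simp [PySem.Set.contains, List.contains_eq_mem]
  rw [Bool.eq_iff_iff, hcm]
  constructor
  · intro hq
    rcases mem_pvPrefs.mp hq with ⟨s, hs, kk, hk1, hk2, rfl⟩
    unfold pvAlive
    rw [List.any_eq_true]
    exact ⟨s, hs, by rw [PySem.Chars.startswith_iff]; exact List.take_prefix _ _⟩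
  · intro hq
    unfold pvAlive at hq
    rw [List.any_eq_true] at hq
    obtain ⟨s, hs, hsw⟩ := hq
    rw [PySem.Chars.startswith_iff] at hsw
    refine mem_pvPrefs.mpr ⟨s, hs, (q.length : Int), by omega, by omega, ?_⟩
    rw [Int.toNat_natCast]
    exact List.prefix_iff_eq_take.mp hsw

lemma pvStepB_eq (DB : List String) (N k : Nat) (hkN : k + 1 ≤ N) (l₁ l₂ : List (List Char))
    (p : List Char) (hsplit : pvLvl DB (k+1) = l₁ ++ p :: l₂) :
    pvStepB (pvPrefs DB (N : Int)) (N : Int) ((k : Int) + 1)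
        (pvWspec DB N k ++ ((l₁.filter (fun q => !pvAlive DB q)).map (pvPad N)),
          (l₁.filter (pvAlive DB)).flatMap pvChilds) p
      = (pvWspec DB N k ++ (((l₁ ++ [p]).filter (fun q => !pvAlive DB q)).map (pvPad N)),
          ((l₁ ++ [p]).filter (pvAlive DB)).flatMap pvChilds) := by
  have hpl : p ∈ pvLvl DB (k+1) := by rw [hsplit]; simp
  have hpb : p ∈ pvBinL (k+1) := (List.mem_filter.mp hpl).1
  rcases mem_pvBinL.mp hpb with ⟨hplen, hpbin⟩
  have hndl := (nodup_pvBinL (k+1)).filter (pvGood DB)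
  have hnd : (l₁ ++ p :: l₂).Nodup := by rw [← hsplit]; exact hndl
  rw [List.nodup_append] at hnd
  have hpnotl₁ : p ∉ l₁ := fun hmem => hnd.2.2 p hmem p (by simp) rfl
  have hl₁bin : ∀ q ∈ l₁, q ∈ pvBinL (k+1) := by
    intro q hq
    have : q ∈ pvLvl DB (k+1) := by rw [hsplit]; exact List.mem_append_left _ hq
    exact (List.mem_filter.mp this).1
  unfold pvStepB
  rw [pvContains_prefs DB (N:Int) p (by omega) (by rw [hplen]; omega)]
  have htoNat : ((N:Int) - ((k:Int) + 1)).toNat = N - p.length := by rw [hplen]; omega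
  cases halp : pvAlive DB p
  · rw [if_neg (by simp)]
    rw [htoNat]
    have hnm : p ++ List.replicate (N - p.length) '*' ∉
        pvWspec DB N k ++ ((l₁.filter (fun q => !pvAlive DB q)).map (pvPad N)) := by
      intro hmem
      rcases List.mem_append.mp hmem with h1 | h1
      · rcases mem_pvWspec.mp h1 with ⟨q', _, hbin', _, hk', heq⟩
        have heqp : q' = p := pvPad_inj hbin' hpbin heq.symm
        subst heqp
        omega
      · rcases List.mem_map.mp h1 with ⟨q', hq'f, heq⟩
        rcases List.mem_filter.mp hq'f with ⟨hq'l₁, _⟩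
        rcases mem_pvBinL.mp (hl₁bin q' hq'l₁) with ⟨_, hbin'⟩
        have heqp : q' = p := pvPad_inj hbin' hpbin heq
        subst heqp
        exact hpnotl₁ hq'l₁
    rw [pvSet_add_of_not_mem hnm]
    rw [List.filter_append, List.filter_append]
    simp [halp, pvPad]
  · rw [if_pos rfl]
    rw [List.filter_append, List.filter_append]
    simp [halp, pvChilds, List.flatMap_append, List.append_assoc]

lemma pvInnerB (DB : List String) (N k : Nat) (hkN : k + 1 ≤ N) :
    ∀ l₂ l₁ : List (List Char), pvLvl DB (k+1) = l₁ ++ l₂ →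
      l₂.foldl (fun st2 q => pvStepB (pvPrefs DB (N : Int)) (N : Int) ((k : Int) + 1) st2 q)
          (pvWspec DB N k ++ ((l₁.filter (fun q => !pvAlive DB q)).map (pvPad N)),
            (l₁.filter (pvAlive DB)).flatMap pvChilds)
        = (pvWspec DB N k ++ (((l₁ ++ l₂).filter (fun q => !pvAlive DB q)).map (pvPad N)),
            ((l₁ ++ l₂).filter (pvAlive DB)).flatMap pvChilds) := by
  intro l₂
  induction l₂ with
  | nil => intro l₁ h; simp
  | cons p l₂' ih =>
    intro l₁ h
    rw [List.foldl_cons, pvStepB_eq DB N k hkN l₁ l₂' p h,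
        ih (l₁ ++ [p]) (by rw [h]; simp)]
    simp

lemma pvFilter_lvl_dead (DB : List String) (k : Nat) :
    (pvLvl DB (k+1)).filter (fun q => !pvAlive DB q) = (pvBinL (k+1)).filter (pvMinDead DB) := by
  unfold pvLvl
  rw [List.filter_filter]
  rfl

lemma pvLvl_succ (DB : List String) (k : Nat) :
    ((pvLvl DB (k+1)).filter (pvAlive DB)).flatMap pvChilds = pvLvl DB (k+2) := by
  have hrhs : pvLvl DB (k+2) = ((pvBinL (k+1)).filter (pvAlive DB)).flatMap pvChilds := by
    unfold pvLvl
    rw [show pvBinL (k+2) = (pvBinL (k+1)).flatMap pvChilds from rfl, List.filter_flatMap]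
    have hpt : ∀ q ∈ pvBinL (k+1),
        (pvChilds q).filter (pvGood DB) = if pvAlive DB q then pvChilds q else [] := by
      intro q hq
      rcases mem_pvBinL.mp hq with ⟨hlen, _⟩
      have h0 : pvGood DB (q ++ ['0']) = pvAlive DB q := by
        unfold pvGood
        rw [List.dropLast_concat,
          show ((q ++ ['0']).length == 1) = false from by
            rw [beq_eq_false_iff_ne]; simp [hlen], Bool.false_or]
      have h1 : pvGood DB (q ++ ['1']) = pvAlive DB q := by
        unfold pvGood
        rw [List.dropLast_concat,
          show ((q ++ ['1']).length == 1) = false from by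
            rw [beq_eq_false_iff_ne]; simp [hlen], Bool.false_or]
      cases halq : pvAlive DB q <;>
        · simp only [pvChilds, List.cons_append, List.nil_append]
          simp [h0, h1, halq]
    rw [pvFlatMap_congr _ _ _ hpt, pvFlatMap_ite]
  rw [hrhs]
  congr 1
  unfold pvLvl
  rw [List.filter_filter]
  apply List.filter_congr
  intro q hq
  rcases mem_pvBinL.mp hq with ⟨hlen, _⟩
  cases halq : pvAlive DB q
  · simp
  · have hgood : pvGood DB q = true := by
      unfold pvGood
      cases k with
      | zero => rw [show (q.length == 1) = true from by simp [hlen]]; simp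
      | succ k' =>
        have : pvAlive DB q.dropLast = true := pvAlive_mono DB (List.dropLast_prefix q) halq
        rw [this]
        simp
    simp [hgood]

lemma pvLvl_one (DB : List String) : pvLvl DB 1 = [['0'], ['1']] := by
  show ([['0'], ['1']] : List (List Char)).filter (pvGood DB) = [['0'], ['1']]
  simp [pvGood]

lemma pvOuterB (DB : List String) (N : Nat) :
    ∀ k : Nat, k ≤ N →
      (PySem.List.pyRange 1 ((k : Int) + 1) 1).foldl (pvBodyB (pvPrefs DB (N : Int)) (N : Int))
          (PySem.Set.empty, [['0'], ['1']])
        = (pvWspec DB N k, pvLvl DB (k+1)) := by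
  intro k
  induction k with
  | zero =>
    intro _
    rw [show ((0:Nat):Int) + 1 = 1 by norm_num, PySem.List.pyRange_one_eq_nil (by omega),
      List.foldl_nil, pvLvl_one]
    rfl
  | succ k ih =>
    intro hk
    rw [show (((k+1:Nat)):Int) + 1 = ((k:Int) + 1) + 1 by push_cast; ring,
      PySem.List.pyRange_one_succ_right (by omega), List.foldl_append, ih (by omega)]
    simp only [List.foldl_cons, List.foldl_nil]
    unfold pvBodyB
    have h := pvInnerB DB N k (by omega) (pvLvl DB (k+1)) [] (by simp)
    simp only [List.filter_nil, List.map_nil, List.append_nil, List.nil_append,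
      List.flatMap_nil] at h
    rw [h, pvFilter_lvl_dead, ← pvWspec_succ, pvLvl_succ]

-- ===== VERDICT (by name: the statement is the Claim_ definition above) =====
theorem PrefixAlgo_spec : Claim_equal_PrefixAlgo := by
  intro DB length _
  unfold Spec_PrefixAlgo
  by_cases hle : length ≤ 0
  · rw [portA_eq, portB_eq, PySem.List.pyRange_one_eq_nil (by omega)]
    rfl
  · have hpos : 0 < length := by omega
    have hN : length = ((length.toNat : Nat) : Int) := by omega
    rw [portA_eq, portB_eq, hN, pvOuterA DB length.toNat length.toNat le_rfl,
        pvOuterB DB length.toNat length.toNat le_rfl]
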